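-- pv_equiv track=rewrite | github.com/jannajchan/python | forMyKnowledge/EX-Number-BinaryDecimal.py | is_binary_xor_palindrome
-- ===== SOURCE A (Python) =====
-- def is_binary_xor_palindrome(binary_str: str) -> bool:
--     if not binary_str:
--         return False
--
--     mismatch_count = 0
--     for i in range(len(binary_str) // 2):
--         if binary_str[i] != binary_str[-(i+1)]:
--             mismatch_count += 1
--
--     return mismatch_count <= 1
-- ===== SOURCE B (Python) =====
-- def is_binary_xor_palindrome(binary_str: str) -> bool:
--     if not binary_str:
--         return False
--     r = binary_str[::-1]
--     if binary_str == r: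
--         return True
--     i = 0
--     while binary_str[i] == r[i]:
--         i += 1
--     inner = binary_str[i + 1 : len(binary_str) - 1 - i]
--     return inner == inner[::-1]
-- ===== Notes on version B (the rewrite author's own statement) =====
-- stated objective: alternative
-- what changed: B replaces A's mismatch counter entirely: it answers True if the string equals its reverse, otherwise finds the first position disagreeing with the reverse and answers whether the inner substring strictly between that symmetric pair is itself a palindrome.
import Mathlib
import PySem

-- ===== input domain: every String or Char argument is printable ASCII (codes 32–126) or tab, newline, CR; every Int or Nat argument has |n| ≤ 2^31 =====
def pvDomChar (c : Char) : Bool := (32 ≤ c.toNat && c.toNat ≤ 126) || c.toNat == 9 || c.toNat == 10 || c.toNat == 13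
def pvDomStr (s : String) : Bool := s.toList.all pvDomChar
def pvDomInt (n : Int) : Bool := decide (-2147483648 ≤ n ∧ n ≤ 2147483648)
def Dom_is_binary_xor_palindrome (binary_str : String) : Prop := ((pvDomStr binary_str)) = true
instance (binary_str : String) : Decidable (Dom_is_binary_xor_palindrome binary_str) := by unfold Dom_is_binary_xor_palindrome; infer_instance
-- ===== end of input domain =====

-- B decides near-palindromicity without any mismatch counter: if the string equals its reverse it
-- answers True, otherwise it locates the FIRST position disagreeing with the reverse and answers
-- whether the inner substring strictly between that pair is itself a palindrome (alternative, same cost).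

-- ===== PORT A =====
def is_binary_xor_palindrome (binary_str : String) : Bool :=
  if binary_str == "" then false
  else
    let mismatch_count : Int :=
      (PySem.List.pyRange 0 (PySem.Int.floordiv (PySem.Str.len binary_str) 2) 1).foldl
        (fun acc i =>
          if PySem.Str.pyGet? binary_str i ≠ PySem.Str.pyGet? binary_str (-(i + 1)) then acc + 1
          else acc) 0
    decide (mismatch_count ≤ 1)

-- ===== PORT B =====
-- the while loop 'while binary_str[i] == r[i]: i += 1'; the dite's else-branch (index past the end)
-- is where Python would raise IndexError — it is unreachable because the loop is entered only when
-- binary_str ≠ r, so a differing index exists before the end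
def pvFirstDiff (s r : String) (fuel i : Nat) : Nat :=
  match fuel with
  | 0 => i
  | fuel + 1 =>
    if PySem.Str.pyGet? s (i : Int) == PySem.Str.pyGet? r (i : Int) then pvFirstDiff s r fuel (i + 1)
    else i

-- binary_str[::-1]: slice? is `some` whenever the step is nonzero, so the `.getD ""` default is unreachable
def is_binary_xor_palindrome_alt (binary_str : String) : Bool :=
  if binary_str == "" then false
  else
    let r : String := (PySem.Str.slice? binary_str none none (-1)).getD ""
    if binary_str == r then true
    else
      let i : Nat := pvFirstDiff binary_str r binary_str.toList.length 0
      let inner : String :=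
        PySem.Str.slice binary_str (some ((i : Int) + 1))
          (some (PySem.Str.len binary_str - 1 - (i : Int)))
      inner == (PySem.Str.slice? inner none none (-1)).getD ""

-- ===== PRECONDITION & SPEC =====
def Spec_is_binary_xor_palindrome (binary_str : String) (out : Bool) : Prop := out = is_binary_xor_palindrome_alt binary_str
instance (binary_str : String) (out : Bool) : Decidable (Spec_is_binary_xor_palindrome binary_str out) := by unfold Spec_is_binary_xor_palindrome; infer_instance

-- ===== CLAIM (what is proved, stated in full; the proofs are below) =====
def Claim_equal_is_binary_xor_palindrome : Prop := ∀ (binary_str : String), Dom_is_binary_xor_palindrome binary_str → Spec_is_binary_xor_palindrome binary_str (is_binary_xor_palindrome binary_str)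

-- ===== LEMMAS AND PROOFS =====

-- index i is a mismatch position of l against its reverse
def pvMism (l : List Char) (i : Nat) : Bool := decide (l[i]? ≠ l[l.length - 1 - i]?)

theorem pv_toList_nil_iff (s : String) : s.toList = [] ↔ s = "" := by
  constructor
  · intro h
    have := congrArg String.ofList h
    simpa using this
  · intro h
    simp [h]

theorem pv_sym (l : List Char) : ∀ i < l.length, pvMism l (l.length - 1 - i) = pvMism l i := by
  intro i hi
  have he : l.length - 1 - (l.length - 1 - i) = i := by omega
  simp only [pvMism, he]
  simp [ne_comm]

theorem pv_mid (l : List Char) (h : l.length % 2 = 1) : pvMism l (l.length / 2) = false := by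
  have he : l.length - 1 - l.length / 2 = l.length / 2 := by omega
  simp [pvMism, he]

-- A's value is 'at most one mismatched pair among the first ⌊n/2⌋ indices'
theorem pv_A_count (s : String) (hl : s.toList ≠ []) :
    (List.range (s.toList.length / 2)).countP
        (fun k : Nat => decide (PySem.Str.pyGet? s ((0 : Int) + (k : Int))
          ≠ PySem.Str.pyGet? s (-((0 : Int) + (k : Int) + 1))))
      = (List.range (s.toList.length / 2)).countP (pvMism s.toList) := by
  refine List.countP_congr ?_
  intro k hk
  rw [List.mem_range] at hk
  have hn : 0 < s.toList.length := List.length_pos_iff.mpr hl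
  have h1 : PySem.Str.pyGet? s ((0 : Int) + (k : Int)) = s.toList[k]? := by
    rw [zero_add, PySem.Str.pyGet?_natCast]
  have hcast : -((0 : Int) + (k : Int) + 1) = -(((k + 1 : Nat) : Int)) := by push_cast; ring
  have h2 : PySem.Str.pyGet? s (-((0 : Int) + (k : Int) + 1))
      = s.toList[s.toList.length - 1 - k]? := by
    show PySem.Chars.pyGet? s.toList _ = _
    rw [PySem.Chars.pyGet?_eq_listPyGet?, hcast,
      PySem.List.pyGet?_neg_natCast s.toList (k + 1) (by omega) (by omega)]
    congr 1
    omega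
  rw [h1, h2]
  simp [pvMism]

theorem pv_A_eq (s : String) (h : ¬ s.toList = []) :
    is_binary_xor_palindrome s
      = decide ((List.range (s.toList.length / 2)).countP (pvMism s.toList) ≤ 1) := by
  have hne : (s == "") = false :=
    beq_eq_false_iff_ne.mpr (fun he => h ((pv_toList_nil_iff s).mpr he))
  unfold is_binary_xor_palindrome
  rw [hne]
  simp only [Bool.false_eq_true, if_false]
  have hfd : PySem.Int.floordiv (PySem.Str.len s) 2 = (((s.toList.length / 2 : Nat)) : Int) := by
    show Int.fdiv ((s.toList.length : Nat) : Int) 2 = _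
    rw [Int.fdiv_eq_ediv]
    have : ((0 : Int) ≤ 2 ∨ (2 : Int) ∣ (s.toList.length : Int)) := Or.inl (by norm_num)
    rw [if_pos this]
    omega
  rw [hfd, PySem.List.pyRange_one, List.foldl_map]
  rw [PySem.List.foldl_ite_add_one (fun k : Nat =>
      PySem.Str.pyGet? s ((0 : Int) + (k : Int))
        ≠ PySem.Str.pyGet? s (-((0 : Int) + (k : Int) + 1)))]
  have htn : ((((s.toList.length / 2 : Nat)) : Int) - 0).toNat = s.toList.length / 2 := by omega
  rw [htn, pv_A_count s h, decide_eq_decide]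
  omega

-- a list equals its reverse iff every position matches its mirror
theorem pv_pal_iff (l : List Char) :
    l = l.reverse ↔ ∀ i < l.length, l[i]? = l[l.length - 1 - i]? := by
  constructor
  · intro h i hi
    conv_lhs => rw [h]
    rw [List.getElem?_reverse hi]
  · intro h
    apply List.ext_getElem?
    intro i
    by_cases hi : i < l.length
    · rw [List.getElem?_reverse hi]
      exact h i hi
    · rw [List.getElem?_eq_none (by omega), List.getElem?_eq_none (by simpa using hi)]
  
-- no mismatch on [a, n/2) extends to no mismatch on [a, n - a) by symmetry (and the middle matches itself)
theorem pv_extend (l : List Char) (a : Nat)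
    (h : ∀ i, a ≤ i → i < l.length / 2 → pvMism l i = false) :
    ∀ k, a ≤ k → k < l.length - a → pvMism l k = false := by
  intro k hak hk
  set n := l.length with hn
  by_cases h1 : k < n / 2
  · exact h k hak h1
  · by_cases h2 : n % 2 = 1 ∧ k = n / 2
    · rw [h2.2]; exact pv_mid l h2.1
    · have hk' : n - 1 - k < n / 2 := by omega
      have ha' : a ≤ n - 1 - k := by omega
      have := pv_sym l k (by omega)
      rw [← this]
      exact h (n - 1 - k) ha' hk'

-- a string differing from its reverse has a mismatch position
theorem pv_exists_mism (l : List Char) (h : l ≠ l.reverse) :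
    ∃ j, j < l.length ∧ pvMism l j = true := by
  by_contra hc
  push_neg at hc
  apply h
  rw [pv_pal_iff]
  intro i hi
  have h2 : ¬ pvMism l i = true := hc i hi
  simpa [pvMism] using h2

-- pvFirstDiff finds the least mismatch index ≥ i (when one exists); r is the reversed string
theorem pv_first_spec (s r : String) (hr : r.toList = s.toList.reverse) :
    ∀ fuel i, s.toList.length ≤ fuel + i →
    (∃ j, i ≤ j ∧ j < s.toList.length ∧ pvMism s.toList j = true) →
    (i ≤ pvFirstDiff s r fuel i ∧ pvFirstDiff s r fuel i < s.toList.length ∧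
      pvMism s.toList (pvFirstDiff s r fuel i) = true ∧
      ∀ j, i ≤ j → j < pvFirstDiff s r fuel i → pvMism s.toList j = false) := by
  intro fuel
  induction fuel with
  | zero =>
    intro i hm ⟨j, hij, hjn, _⟩
    omega
  | succ m ih =>
    intro i hm ⟨j, hij, hjn, hjm⟩
    have hi : i < s.toList.length := by omega
    have hget : PySem.Str.pyGet? s (i : Int) = s.toList[i]? := PySem.Str.pyGet?_natCast s i
    have hgetr : PySem.Str.pyGet? r (i : Int) = s.toList[s.toList.length - 1 - i]? := by
      rw [PySem.Str.pyGet?_natCast, hr, List.getElem?_reverse (by simpa using hi)]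
    by_cases hc : PySem.Str.pyGet? s (i : Int) = PySem.Str.pyGet? r (i : Int)
    · -- current pair matches: recurse
      have hmi : pvMism s.toList i = false := by
        simp only [pvMism, decide_eq_false_iff_not, not_not]
        rw [← hget, ← hgetr, hc]
      have hij' : i ≠ j := by
        intro he; rw [he] at hmi; rw [hmi] at hjm; exact Bool.false_ne_true hjm
      have hrec := ih (i + 1) (by omega) ⟨j, by omega, hjn, hjm⟩
      have hstep : pvFirstDiff s r (m + 1) i = pvFirstDiff s r m (i + 1) := by
        simp only [pvFirstDiff]
        rw [if_pos (beq_iff_eq.mpr hc)]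
      rw [hstep]
      refine ⟨by omega, hrec.2.1, hrec.2.2.1, ?_⟩
      intro k hik hkf
      by_cases hki : k = i
      · rw [hki]; exact hmi
      · exact hrec.2.2.2 k (by omega) hkf
    · have hstep : pvFirstDiff s r (m + 1) i = i := by
        simp only [pvFirstDiff]
        rw [if_neg (by simpa using hc)]
      rw [hstep]
      refine ⟨le_refl i, hi, ?_, fun j h1 h2 => by omega⟩
      simp only [pvMism, ne_eq, decide_eq_true_eq]
      rw [← hget, ← hgetr]
      exact hc

-- the least mismatch index lies in the first half
theorem pv_first_lt_half (l : List Char) (i : Nat)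
    (hi : i < l.length) (hm : pvMism l i = true)
    (hmin : ∀ j, j < i → pvMism l j = false) : i < l.length / 2 := by
  set n := l.length with hn
  by_contra hge
  push_neg at hge
  have hnotmid : ¬ (n % 2 = 1 ∧ i = n / 2) := by
    intro ⟨ho, he⟩
    rw [he, pv_mid l ho] at hm
    exact Bool.false_ne_true hm
  have hlt : n - 1 - i < i := by omega
  have := pv_sym l i hi
  rw [this] at *
  have := hmin (n - 1 - i) hlt
  rw [pv_sym l i hi] at this
  rw [this] at hm
  exact Bool.false_ne_true hm

-- mismatch count ≤ 1 given: no mismatch before i0, a mismatch at i0 < n/2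
theorem pv_count_le_one (l : List Char) (i0 : Nat) (h0 : i0 < l.length / 2)
    (hm : pvMism l i0 = true) (hmin : ∀ j, j < i0 → pvMism l j = false) :
    ((List.range (l.length / 2)).countP (pvMism l) ≤ 1
      ↔ ∀ k, i0 + 1 ≤ k → k < l.length / 2 → pvMism l k = false) := by
  have hlist : List.range (l.length / 2)
      = List.range (i0 + 1) ++ List.range' (i0 + 1) (l.length / 2 - (i0 + 1)) := by
    rw [List.range_eq_range', List.range_eq_range']
    have h := @List.range'_append 0 (i0 + 1) (l.length / 2 - (i0 + 1)) 1
    simp only [Nat.zero_add, Nat.one_mul] at h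
    have hn2 : l.length / 2 = (i0 + 1) + (l.length / 2 - (i0 + 1)) := by omega
    conv_lhs => rw [hn2]
    rw [← h]
  have hpre : (List.range (i0 + 1)).countP (pvMism l) = 1 := by
    rw [List.range_succ, List.countP_append]
    have hz : (List.range i0).countP (pvMism l) = 0 := by
      rw [List.countP_eq_zero]
      intro a ha
      rw [List.mem_range] at ha
      simp [hmin a ha]
    simp [hz, hm]
  rw [hlist, List.countP_append, hpre]
  constructor
  · intro h k h1 h2
    have hT : (List.range' (i0 + 1) (l.length / 2 - (i0 + 1))).countP (pvMism l) = 0 := by omega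
    rw [List.countP_eq_zero] at hT
    have := hT k (List.mem_range'_1.mpr ⟨h1, by omega⟩)
    simpa using this
  · intro h
    have hT : (List.range' (i0 + 1) (l.length / 2 - (i0 + 1))).countP (pvMism l) = 0 := by
      rw [List.countP_eq_zero]
      intro a ha
      rw [List.mem_range'_1] at ha
      simp [h a ha.1 (by omega)]
    omega

theorem pv_beq_ofList (u : String) (v : List Char) :
    (u == String.ofList v) = decide (u.toList = v) := by
  by_cases h : u.toList = v
  · simp [← h]
  · have hne : u ≠ String.ofList v := by
      intro he; apply h; rw [he]; simp
    simp [hne, h]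

-- the inner substring between a symmetric pair is a palindrome iff no mismatch occurs on [a, a+m)
theorem pv_inner_iff (l : List Char) (a m : Nat) (ham : a + m = l.length - a)
    (ha : a ≤ l.length) :
    ((List.take m (List.drop a l)) = (List.take m (List.drop a l)).reverse
      ↔ ∀ j, a ≤ j → j < a + m → pvMism l j = false) := by
  set t := List.take m (List.drop a l) with ht
  have hlen : t.length = m := by
    rw [ht, List.length_take, List.length_drop]
    omega
  have hk : ∀ k, k < m → t[k]? = l[a + k]? := by
    intro k hkm
    rw [ht, List.getElem?_take, if_pos hkm, List.getElem?_drop]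
  rw [pv_pal_iff, hlen]
  constructor
  · intro hp j hja hjm
    have hkm : j - a < m := by omega
    have := hp (j - a) hkm
    rw [hk (j - a) hkm, hk (m - 1 - (j - a)) (by omega)] at this
    have he1 : a + (j - a) = j := by omega
    have he2 : a + (m - 1 - (j - a)) = l.length - 1 - j := by omega
    rw [he1, he2] at this
    simp [pvMism, this]
  · intro hp k hkm
    have hj := hp (a + k) (by omega) (by omega)
    simp only [pvMism, decide_eq_false_iff_not, not_not] at hj
    rw [hk k hkm, hk (m - 1 - k) (by omega)]
    have he : a + (m - 1 - k) = l.length - 1 - (a + k) := by omega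
    rw [he]
    exact hj

theorem pv_B_eq (s : String) (h : ¬ s.toList = []) :
    is_binary_xor_palindrome_alt s
      = decide ((List.range (s.toList.length / 2)).countP (pvMism s.toList) ≤ 1) := by
  have hne : (s == "") = false :=
    beq_eq_false_iff_ne.mpr (fun he => h ((pv_toList_nil_iff s).mpr he))
  have hn : 0 < s.toList.length := List.length_pos_iff.mpr h
  unfold is_binary_xor_palindrome_alt
  rw [hne]
  simp only [Bool.false_eq_true, if_false, PySem.Str.slice?_none_none_neg_one, Option.getD_some,
    pv_beq_ofList]
  by_cases hpal : s.toList = s.toList.reverse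
  · rw [decide_eq_true hpal]
    simp only [if_true]
    have hC : (List.range (s.toList.length / 2)).countP (pvMism s.toList) = 0 := by
      rw [List.countP_eq_zero]
      intro a ha
      rw [List.mem_range] at ha
      have := (pv_pal_iff s.toList).mp hpal a (by omega)
      simp [pvMism, this]
    have hC' : List.countP (pvMism s.toList) (List.range (s.length / 2)) = 0 := by
      simpa using hC
    simp [hC']
  · rw [decide_eq_false hpal]
    simp only [Bool.false_eq_true, if_false]
    obtain ⟨j, hjn, hjm⟩ := pv_exists_mism s.toList hpal
    have hr : (String.ofList s.toList.reverse).toList = s.toList.reverse := by simp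
    have hfs := pv_first_spec s (String.ofList s.toList.reverse) hr s.toList.length 0
      (by omega) ⟨j, by omega, hjn, hjm⟩
    set i0 := pvFirstDiff s (String.ofList s.toList.reverse) s.toList.length 0 with hi0
    have hmin : ∀ j', j' < i0 → pvMism s.toList j' = false :=
      fun j' hj' => hfs.2.2.2 j' (by omega) hj'
    have hhalf : i0 < s.toList.length / 2 :=
      pv_first_lt_half s.toList i0 hfs.2.1 hfs.2.2.1 hmin
    have hcast1 : (i0 : Int) + 1 = ((i0 + 1 : Nat) : Int) := by push_cast; ring
    have hcast2 : PySem.Str.len s - 1 - (i0 : Int)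
        = ((s.toList.length - 1 - i0 : Nat) : Int) := by
      show ((s.toList.length : Nat) : Int) - 1 - (i0 : Int) = _
      omega
    rw [hcast1, hcast2]
    have ht : (PySem.Str.slice s (some ((i0 + 1 : Nat) : Int))
          (some ((s.toList.length - 1 - i0 : Nat) : Int))).toList
        = List.take ((s.toList.length - 1 - i0) - (i0 + 1)) (List.drop (i0 + 1) s.toList) := by
      rw [PySem.Str.toList_slice, PySem.Chars.slice_eq_listSlice, PySem.List.slice_natCast]
    rw [ht, decide_eq_decide]
    have ham : (i0 + 1) + ((s.toList.length - 1 - i0) - (i0 + 1))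
        = s.toList.length - (i0 + 1) := by omega
    rw [pv_inner_iff s.toList (i0 + 1) ((s.toList.length - 1 - i0) - (i0 + 1)) ham (by omega),
      pv_count_le_one s.toList i0 hhalf hfs.2.2.1 hmin, ham]
    constructor
    · intro hp k h1 h2
      exact hp k h1 (by omega)
    · intro hp k h1 h2
      exact pv_extend s.toList (i0 + 1) hp k h1 (by omega)

-- ===== VERDICT (by name: the statement is the Claim_ definition above) =====
theorem is_binary_xor_palindrome_spec : Claim_equal_is_binary_xor_palindrome := by
  intro s _
  unfold Spec_is_binary_xor_palindrome
  by_cases h : s.toList = []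
  · have hs : s = "" := (pv_toList_nil_iff s).mp h
    subst hs
    rfl
  · rw [pv_A_eq s h, pv_B_eq s h]
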